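-- pv_equiv track=rewrite | github.com/gabriellaec/desoft-analise-exercicios | backup/user_287/ch167_2020_06_22_18_14_44_139592.py | bairro_mais_custoso
-- ===== SOURCE A (Python) =====
-- def bairro_mais_custoso(gastos):
--     dic1 = {}
--     dic2 = {}
--
--     for k, v in gastos.items():
--         dic1[k] = v[6:12]
--
--     for i, j in dic1.items():
--         dic2[i] = sum(j)
--
--     for a, b in dic2.items():
--         if b == max(dic2.values()):
--
--             return a
-- ===== SOURCE B (Python) =====
-- def bairro_mais_custoso(gastos):
--     best_key = None
--     best_sum = None
--     for k, v in gastos.items():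
--         s = sum(v[6:12])
--         if best_sum is None or s > best_sum:
--             best_key = k
--             best_sum = s
--     return best_key
-- ===== Notes on version B (the rewrite author's own statement) =====
-- stated objective: simpler
-- what changed: Single pass keeping only the running argmax (O(1) state) instead of building two intermediate dictionaries and rescanning; no sum table is materialised and max() is not recomputed.
-- outside the precondition, e.g. on bairro_mais_custoso({}): A returns None, B returns None
import Mathlib
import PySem

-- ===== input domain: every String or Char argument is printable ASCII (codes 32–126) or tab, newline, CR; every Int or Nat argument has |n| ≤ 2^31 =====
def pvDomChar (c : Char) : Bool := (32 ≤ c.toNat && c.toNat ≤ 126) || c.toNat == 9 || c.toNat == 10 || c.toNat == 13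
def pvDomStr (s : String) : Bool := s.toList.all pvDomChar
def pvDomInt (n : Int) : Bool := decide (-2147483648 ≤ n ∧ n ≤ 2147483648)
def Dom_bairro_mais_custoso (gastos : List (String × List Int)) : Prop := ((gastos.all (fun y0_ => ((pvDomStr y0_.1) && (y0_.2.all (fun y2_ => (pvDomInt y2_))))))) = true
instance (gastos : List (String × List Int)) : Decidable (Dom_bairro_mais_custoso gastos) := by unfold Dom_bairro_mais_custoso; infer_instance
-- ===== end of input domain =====

-- B replaces A's two intermediate dictionaries + per-element max() rescan by a single fold
-- keeping only the running argmax; equivalence of RETURN values is proved for nonempty input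
-- (on an empty dict A returns None, not a string, so Pre_ excludes it).


-- ===== PORT A =====
-- the final 'for a, b in dic2.items(): if b == max(dic2.values()): return a' loop;
-- as in the Python, max(dic2.values()) is recomputed at each iteration (vals is constant).
def pvALoop (vals : List Int) : List (String × Int) → String
  | [] => ""        -- Python falls off the loop and returns None; excluded by Pre_
  | (a, b) :: rest =>
      if PySem.List.max? vals (fun y => y) == some b then a else pvALoop vals rest

def bairro_mais_custoso (gastos : List (String × List Int)) : String :=
  -- the Python parameter is a dict: build it from the association list first
  let g := PySem.Dict.ofList gastos
  let dic1 := g.items.foldl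
    (fun (d : PySem.Dict String (List Int)) p =>
      d.insert p.1 (PySem.List.slice p.2 (some 6) (some 12))) PySem.Dict.empty
  let dic2 := dic1.items.foldl
    (fun (d : PySem.Dict String Int) p => d.insert p.1 p.2.sum) PySem.Dict.empty
  pvALoop dic2.values dic2.items

-- ===== PORT B =====
def pvBLoop : List (String × List Int) → Option String → Option Int → Option String
  | [], bestKey, _ => bestKey
  | (k, v) :: rest, bestKey, bestSum =>
      let s := (PySem.List.slice v (some 6) (some 12)).sum
      match bestSum with
      | none => pvBLoop rest (some k) (some s)
      | some m => if s > m then pvBLoop rest (some k) (some s)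
                  else pvBLoop rest bestKey bestSum

def bairro_mais_custoso_alt (gastos : List (String × List Int)) : String :=
  ((pvBLoop (PySem.Dict.ofList gastos).items none none).getD "")
  -- .getD "": on an empty dict the Python B returns None (outside Pre_)

-- ===== PRECONDITION & SPEC =====
-- Pre_ excludes only the empty dict, on which A returns None (not a string).
def Pre_bairro_mais_custoso (gastos : List (String × List Int)) : Prop := gastos ≠ []
instance (gastos : List (String × List Int)) : Decidable (Pre_bairro_mais_custoso gastos) := by unfold Pre_bairro_mais_custoso; infer_instance

def pvWitness_bairro_mais_custoso : (List (String × List Int)) :=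
  [("a", [0,0,0,0,0,0,3,4]), ("b", [1,1,1,1,1,1,2])]

def Spec_bairro_mais_custoso (gastos : List (String × List Int)) (out : String) : Prop := out = bairro_mais_custoso_alt gastos
instance (gastos : List (String × List Int)) (out : String) : Decidable (Spec_bairro_mais_custoso gastos out) := by unfold Spec_bairro_mais_custoso; infer_instance

-- ===== CLAIM (what is proved, stated in full; the proofs are below) =====
def Claim_equal_bairro_mais_custoso : Prop := ∀ (gastos : List (String × List Int)), Dom_bairro_mais_custoso gastos → Pre_bairro_mais_custoso gastos → Spec_bairro_mais_custoso gastos (bairro_mais_custoso gastos)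

-- ===== LEMMAS AND PROOFS =====

-- proof-only abbreviations: slice-sum of a row, and the pair an items row maps to
def pvF (v : List Int) : Int := (PySem.List.slice v (some 6) (some 12)).sum
def pvG (p : String × List Int) : String × Int := (p.1, pvF p.2)

-- first key whose sum equals m (A's loop once the constant max is named)
def pvFind (m : Int) : List (String × Int) → String
  | [] => ""
  | (a, b) :: rest => if b = m then a else pvFind m rest

-- B's loop once both accumulators are populated, phrased on (key, sum) pairs
def pvBP : List (String × Int) → String → Int → String
  | [], k0, _ => k0
  | (k, s) :: rest, k0, s0 => if s > s0 then pvBP rest k s else pvBP rest k0 s0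

theorem pvALoop_eq_pvFind (vals : List Int) (m : Int)
    (h : PySem.List.max? vals (fun y => y) = some m) (l : List (String × Int)) :
    pvALoop vals l = pvFind m l := by
  induction l with
  | nil => rfl
  | cons p rest ih =>
      obtain ⟨a, b⟩ := p
      rcases eq_or_ne b m with hb | hb
      · subst hb; simp [pvALoop, pvFind, h]
      · simp only [pvALoop, pvFind, h, ih, beq_iff_eq, Option.some.injEq,
          if_neg hb, if_neg (Ne.symm hb)]

theorem pvBLoop_some (L : List (String × List Int)) (k0 : String) (s0 : Int) :
    pvBLoop L (some k0) (some s0) = some (pvBP (L.map pvG) k0 s0) := by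
  induction L generalizing k0 s0 with
  | nil => rfl
  | cons p rest ih =>
      obtain ⟨k, v⟩ := p
      simp only [pvBLoop, pvBP, List.map_cons, pvG, pvF]
      split_ifs <;> exact ih _ _

theorem pvCore (M : List (String × Int)) (k0 : String) (s0 : Int) :
    pvBP M k0 s0 = pvFind ((M.map Prod.snd).foldl max s0) ((k0, s0) :: M) := by
  induction M generalizing k0 s0 with
  | nil => simp [pvBP, pvFind]
  | cons p rest ih =>
      obtain ⟨k, s⟩ := p
      by_cases hgt : s > s0
      · have hmax : max s0 s = s := by omega
        have hle : s ≤ (rest.map Prod.snd).foldl max s :=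
          (PySem.List.le_foldl_max (rest.map Prod.snd) s).1
        simp only [pvBP, if_pos hgt, List.map_cons, List.foldl_cons, hmax, ih]
        have hne : s0 ≠ (rest.map Prod.snd).foldl max s := by omega
        simp only [pvFind, if_neg hne]
      · have hmax : max s0 s = s0 := by omega
        have hle : s0 ≤ (rest.map Prod.snd).foldl max s0 :=
          (PySem.List.le_foldl_max (rest.map Prod.snd) s0).1
        simp only [pvBP, if_neg hgt, List.map_cons, List.foldl_cons, hmax, ih]
        by_cases h0 : s0 = (rest.map Prod.snd).foldl max s0
        · simp only [pvFind, if_pos h0]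
        · have hs : s ≠ (rest.map Prod.snd).foldl max s0 := by omega
          simp only [pvFind, if_neg h0, if_neg hs]

theorem pvItemsNe (gastos : List (String × List Int)) (h : gastos ≠ []) :
    (PySem.Dict.ofList gastos).items ≠ [] := by
  intro hnil
  have hk : (PySem.Dict.ofList gastos).keys =
      PySem.Set.update (PySem.Dict.empty (κ := String) (ν := List Int)).keys
        (gastos.map Prod.fst) :=
    PySem.Dict.keys_foldl_insert_key gastos Prod.fst (fun d p => p.2) PySem.Dict.empty
  obtain ⟨p, rest, rfl⟩ := List.exists_cons_of_ne_nil h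
  have : (PySem.Dict.ofList ((p :: rest) : List (String × List Int))).keys = [] := by
    simp [PySem.Dict.keys, hnil]
  rw [hk] at this
  simp [PySem.Set.update_eq_append_filter, PySem.Set.ofList_cons] at this

-- ===== VERDICT (by name: the statement is the Claim_ definition above) =====
theorem bairro_mais_custoso_spec : Claim_equal_bairro_mais_custoso := by
  intro gastos _ hpre
  unfold Spec_bairro_mais_custoso
  dsimp only [bairro_mais_custoso, bairro_mais_custoso_alt]
  simp only [PySem.Dict.values]
  set L := (PySem.Dict.ofList gastos).items with hL
  have hkeys : (L.map Prod.fst).Nodup := PySem.Dict.nodup_keys_ofList gastos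
  -- dic1.items = L.map (fun p => (p.1, slice p.2 6 12))
  have h1 : (L.foldl
      (fun (d : PySem.Dict String (List Int)) p =>
        d.insert p.1 (PySem.List.slice p.2 (some 6) (some 12))) PySem.Dict.empty).items
      = L.map (fun p => (p.1, PySem.List.slice p.2 (some 6) (some 12))) := by
    have := PySem.Dict.items_foldl_insert_fresh L Prod.fst
      (fun p => PySem.List.slice p.2 (some 6) (some 12)) PySem.Dict.empty
      (fun a _ => PySem.Dict.contains_empty a.1) hkeys
    simpa using this
  rw [h1]
  -- dic2.items = L.map pvG
  have hkeys2 : ((L.map (fun p => (p.1, PySem.List.slice p.2 (some 6) (some 12)))).map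
      Prod.fst).Nodup := by
    simpa [Function.comp] using hkeys
  have h2 : ((L.map (fun p => (p.1, PySem.List.slice p.2 (some 6) (some 12)))).foldl
      (fun (d : PySem.Dict String Int) p => d.insert p.1 p.2.sum) PySem.Dict.empty).items
      = L.map pvG := by
    have := PySem.Dict.items_foldl_insert_fresh
      (L.map (fun p => (p.1, PySem.List.slice p.2 (some 6) (some 12)))) Prod.fst
      (fun p => p.2.sum) PySem.Dict.empty
      (fun a _ => PySem.Dict.contains_empty a.1) hkeys2
    simpa [Function.comp, pvG, pvF] using this
  rw [h2]
  -- nonempty items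
  obtain ⟨q, L', hLq⟩ := List.exists_cons_of_ne_nil (pvItemsNe gastos hpre)
  rw [← hL] at hLq
  rw [hLq]
  -- B side
  have hB : pvBLoop (q :: L') none none = some (pvBP (L'.map pvG) q.1 (pvF q.2)) := by
    obtain ⟨k, v⟩ := q
    simp only [pvBLoop]
    exact pvBLoop_some L' k _
  rw [hB, Option.getD_some]
  -- A side: name the max and reduce the loop to pvFind
  have hmax : PySem.List.max? (((q :: L').map pvG).map Prod.snd) (fun y => y)
      = some (((L'.map pvG).map Prod.snd).foldl max (pvF q.2)) := by
    rw [List.map_cons, List.map_cons,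
      (show (pvG q).snd = pvF q.2 from rfl)]
    exact PySem.List.max?_id_cons _ _
  rw [pvALoop_eq_pvFind _ _ hmax, List.map_cons,
    (show pvG q = (q.1, pvF q.2) from rfl), ← pvCore]
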